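-- pv_equiv track=rewrite | github.com/hw233/gsdld_pokemon2 | code/game/mgr/rank.py | _comp
-- ===== SOURCE A (Python) =====
-- def _comp(x, y):
--     xEle = x.get("sortEle", [])
--     yEle = y.get("sortEle", [])
--     if not xEle or not yEle:
--         return 0
--
--     xLen = len(xEle)
--     yLen = len(yEle)
--
--     minLen = xLen if xLen <= yLen else yLen
--     for idx in range(minLen):
--         if xEle[idx] < yEle[idx]:
--             return 1
--
--         if xEle[idx] > yEle[idx]:
--             return -1
--
--     return 0
-- ===== SOURCE B (Python) =====
-- def _cmp_rec(a, b):
--     # structural recursion: stop when either list is exhausted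
--     if not a or not b:
--         return 0
--     if a[0] != b[0]:
--         return 1 if a[0] < b[0] else -1
--     return _cmp_rec(a[1:], b[1:])
--
--
-- def _comp(x, y):
--     xEle = x.get("sortEle", [])
--     yEle = y.get("sortEle", [])
--     if not xEle or not yEle:
--         return 0
--     return _cmp_rec(xEle, yEle)
-- ===== Notes on version B (the rewrite author's own statement) =====
-- stated objective: alternative
-- what changed: Replaces A's bounded index loop over range(minLen) with direct structural recursion on the two lists (no length/minLen computation, no indexing): recursion terminates by itself when either list runs out, deciding on the first unequal pair.
import Mathlib
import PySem

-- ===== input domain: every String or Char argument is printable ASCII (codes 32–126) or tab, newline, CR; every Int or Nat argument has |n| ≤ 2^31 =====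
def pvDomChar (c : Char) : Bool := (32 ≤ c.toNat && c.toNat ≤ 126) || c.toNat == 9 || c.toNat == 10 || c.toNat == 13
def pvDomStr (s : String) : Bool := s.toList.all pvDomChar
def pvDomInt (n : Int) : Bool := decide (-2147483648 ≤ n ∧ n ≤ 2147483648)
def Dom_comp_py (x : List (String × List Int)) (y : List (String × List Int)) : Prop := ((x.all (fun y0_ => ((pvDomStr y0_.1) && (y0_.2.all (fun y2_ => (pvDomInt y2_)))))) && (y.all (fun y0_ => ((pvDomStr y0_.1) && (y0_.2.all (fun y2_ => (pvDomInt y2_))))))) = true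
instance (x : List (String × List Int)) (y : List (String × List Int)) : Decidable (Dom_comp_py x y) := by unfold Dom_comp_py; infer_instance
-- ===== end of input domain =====

-- B replaces A's bounded index loop (range(minLen) with xEle[idx]/yEle[idx]) by direct
-- structural recursion on the two lists, with no length/minLen computation: alternative decomposition.

-- ===== PORT A =====
-- x.get("sortEle", []) : first match in the association list, default []
def getSortEle (d : List (String × List Int)) : List Int :=
  match d.find? (fun p => p.1 == "sortEle") with
  | some p => p.2
  | none => []

-- the 'for idx in range(minLen)' loop; rem = minLen - idx; indices stay in range (proved in the lemmas)
def compA_loop (xEle yEle : List Int) (idx : Nat) : Nat → Int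
  | 0 => 0
  | rem + 1 =>
    if xEle.getD idx 0 < yEle.getD idx 0 then 1
    else if xEle.getD idx 0 > yEle.getD idx 0 then -1
    else compA_loop xEle yEle (idx + 1) rem

def comp_py (x : List (String × List Int)) (y : List (String × List Int)) : Int :=
  let xEle := getSortEle x
  let yEle := getSortEle y
  if xEle.isEmpty || yEle.isEmpty then 0
  else
    let xLen := xEle.length
    let yLen := yEle.length
    let minLen := if xLen ≤ yLen then xLen else yLen
    compA_loop xEle yEle 0 minLen

-- ===== PORT B =====
-- _cmp_rec: structural recursion on both lists, stops when either is exhausted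
def cmpRec : List Int → List Int → Int
  | [], _ => 0
  | _ :: _, [] => 0
  | a :: as, b :: bs => if a ≠ b then (if a < b then 1 else -1) else cmpRec as bs

def comp_py_alt (x : List (String × List Int)) (y : List (String × List Int)) : Int :=
  let xEle := getSortEle x
  let yEle := getSortEle y
  if xEle.isEmpty || yEle.isEmpty then 0
  else cmpRec xEle yEle

-- ===== PRECONDITION & SPEC =====
def Spec_comp_py (x : List (String × List Int)) (y : List (String × List Int)) (out : Int) : Prop := out = comp_py_alt x y
instance (x : List (String × List Int)) (y : List (String × List Int)) (out : Int) : Decidable (Spec_comp_py x y out) := by unfold Spec_comp_py; infer_instance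

-- ===== CLAIM =====
def Claim_equal_comp_py : Prop := ∀ (x : List (String × List Int)) (y : List (String × List Int)), Dom_comp_py x y → Spec_comp_py x y (comp_py x y)

-- ===== LEMMAS AND PROOFS =====

-- A's loop from index idx for rem steps equals B's recursion on the corresponding slices
lemma compA_loop_eq (rem : Nat) : ∀ (idx : Nat) (xs ys : List Int),
    idx + rem ≤ xs.length → idx + rem ≤ ys.length →
    compA_loop xs ys idx rem = cmpRec ((xs.drop idx).take rem) ((ys.drop idx).take rem) := by
  induction rem with
  | zero => intro idx xs ys _ _; simp [compA_loop, cmpRec]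
  | succ n ih =>
    intro idx xs ys hx hy
    have hxi : idx < xs.length := by omega
    have hyi : idx < ys.length := by omega
    have hdx : xs.drop idx = xs[idx] :: xs.drop (idx + 1) := List.drop_eq_getElem_cons hxi
    have hdy : ys.drop idx = ys[idx] :: ys.drop (idx + 1) := List.drop_eq_getElem_cons hyi
    have hgx : xs.getD idx 0 = xs[idx] := List.getD_eq_getElem xs 0 hxi
    have hgy : ys.getD idx 0 = ys[idx] := List.getD_eq_getElem ys 0 hyi
    rw [hdx, hdy]
    simp only [List.take_succ_cons, compA_loop, hgx, hgy, cmpRec]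
    by_cases h1 : xs[idx] < ys[idx]
    · have h3 : xs[idx] ≠ ys[idx] := by omega
      simp [h1, h3]
    · by_cases h2 : ys[idx] < xs[idx]
      · have h3 : xs[idx] ≠ ys[idx] := by omega
        simp [h1, h2, h3]
      · have h3 : xs[idx] = ys[idx] := by omega
        simp only [h3, lt_irrefl, if_false, ne_eq, not_true_eq_false]
        exact ih (idx + 1) xs ys (by omega) (by omega)

-- truncating both lists to (at least) the common length does not change cmpRec
lemma cmpRec_take : ∀ (n : Nat) (a b : List Int), min a.length b.length ≤ n →
    cmpRec (a.take n) (b.take n) = cmpRec a b := by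
  intro n
  induction n with
  | zero =>
    intro a b h
    match a, b with
    | [], _ => simp [cmpRec]
    | _ :: _, [] => simp [cmpRec]
    | _ :: _, _ :: _ => simp at h
  | succ n ih =>
    intro a b h
    match a, b with
    | [], _ => simp [cmpRec]
    | _ :: _, [] => simp [cmpRec]
    | x :: xs, y :: ys =>
      simp only [List.take_succ_cons, cmpRec]
      split
      · rfl
      · exact ih xs ys (by simp at h ⊢; omega)

theorem comp_py_spec : Claim_equal_comp_py := by
  intro x y _
  unfold Spec_comp_py comp_py comp_py_alt
  set xs := getSortEle x with hxs
  set ys := getSortEle y with hys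
  by_cases h : xs.isEmpty || ys.isEmpty
  · simp [h]
  · simp only [h, if_false, Bool.false_eq_true]
    have hminA : (if xs.length ≤ ys.length then xs.length else ys.length) = min xs.length ys.length := by
      split <;> omega
    rw [hminA, compA_loop_eq (min xs.length ys.length) 0 xs ys (by omega) (by omega)]
    simp only [List.drop_zero]
    exact cmpRec_take _ xs ys (le_refl _)
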